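-- pv_equiv track=rewrite | github.com/rpfumanchu/Tres-en-raya | list_utils.py | find_streak
-- ===== SOURCE A (Python) =====
-- def find_streak(list, aguja, n):
--     """
--     devuelve true si en list hay n o mas seguidos o más agujas segudos
--     """
--     #si n >= 0
--     if n >= 0:
--         #inicializo el indice,  el contador y el indicador de racha
--         indice = 0
--         contador = 0
--         racha = False
--         #mientras no haya encontrado n seguidos u la lista no se haya acabado
--         while contador < n and indice < len(list):
--             #si lo encuentro activo el indicador de racha y actualizo el contador
--             if aguja == list[indice]:
--                 racha = True
--                 contador = contador + 1
--             #si no lo encuentro, desactivo el indicador de racha y lo pongo a cero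
--             else:
--                 racha = False
--                 contador = 0
--             #avanzo al siguiente elemneto
--             indice = indice +1
--         #devolvemos el resultadoado de comparar con n SIEMPRE Y CUANDO estemos en racha
--         return contador >= n and racha
--     else:
--         #para valores de n < 0 no tiene sentido
--         return False
-- ===== SOURCE B (Python) =====
-- def find_streak(list, aguja, n):
--     """
--     devuelve true si en list hay n o mas seguidos o más agujas segudos
--     """
--     # Transform-then-group: build a boolean mask, collect the lengths of the
--     # maximal runs of True, then ask whether any run is long enough.
--     if n < 1:
--         return False
--     mask = [x == aguja for x in list]
--     runs = []
--     cur = 0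
--     for b in mask:
--         if b:
--             cur = cur + 1
--         else:
--             if cur != 0:
--                 runs.append(cur)
--             cur = 0
--     if cur != 0:
--         runs.append(cur)
--     return any(r >= n for r in runs)
-- ===== Notes on version B (the rewrite author's own statement) =====
-- stated objective: alternative
-- what changed: A is a single early-exit streak-counting while loop over indices; B is a two-phase transform-then-group pipeline: a boolean mask built by a comprehension, then the lengths of maximal True-runs, then an any() over those lengths, with n<1 guarded up front.
import Mathlib
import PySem

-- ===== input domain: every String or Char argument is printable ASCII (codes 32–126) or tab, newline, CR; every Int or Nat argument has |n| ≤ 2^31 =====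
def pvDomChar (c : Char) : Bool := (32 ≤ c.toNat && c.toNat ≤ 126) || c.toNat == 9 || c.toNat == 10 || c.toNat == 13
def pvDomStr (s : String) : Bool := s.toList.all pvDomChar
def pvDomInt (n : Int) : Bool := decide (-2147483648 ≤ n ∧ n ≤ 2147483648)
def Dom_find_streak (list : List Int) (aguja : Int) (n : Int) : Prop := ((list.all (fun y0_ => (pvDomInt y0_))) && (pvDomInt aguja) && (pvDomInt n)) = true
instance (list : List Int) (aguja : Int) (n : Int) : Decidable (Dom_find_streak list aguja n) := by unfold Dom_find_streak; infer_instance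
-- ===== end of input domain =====

-- B replaces A's early-exit streak-counting while loop by a two-phase pipeline
-- (boolean mask, then run lengths, then any); same cost, alternative decomposition.


-- ===== PORT A =====
-- the while loop: state (contador, racha), scanning the list from indice;
-- runs while contador < n and elements remain, returns the final (contador, racha)
def find_streak_loop (aguja n : Int) : List Int → Int → Bool → Int × Bool
  | [], contador, racha => (contador, racha)
  | x :: rest, contador, racha =>
      if contador < n then
        if aguja = x then find_streak_loop aguja n rest (contador + 1) true
        else find_streak_loop aguja n rest 0 false
      else (contador, racha)

def find_streak (list : List Int) (aguja : Int) (n : Int) : Bool :=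
  if n ≥ 0 then
    let st := find_streak_loop aguja n list 0 false
    decide (st.1 ≥ n) && st.2
  else
    false

-- ===== PORT B =====
-- one step of the run-collecting loop: state (runs so far, current run length)
def fsCollect (st : List Int × Int) (b : Bool) : List Int × Int :=
  if b then (st.1, st.2 + 1)
  else if st.2 ≠ 0 then (st.1 ++ [st.2], 0) else (st.1, 0)

def find_streak_alt (list : List Int) (aguja : Int) (n : Int) : Bool :=
  if n < 1 then false
  else
    let mask := list.map (fun x => decide (x = aguja))
    let st := mask.foldl fsCollect ([], 0)
    let runs := if st.2 ≠ 0 then st.1 ++ [st.2] else st.1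
    runs.any (fun r => decide (r ≥ n))

-- ===== PRECONDITION & SPEC =====
def Spec_find_streak (list : List Int) (aguja : Int) (n : Int) (out : Bool) : Prop := out = find_streak_alt list aguja n
instance (list : List Int) (aguja : Int) (n : Int) (out : Bool) : Decidable (Spec_find_streak list aguja n out) := by unfold Spec_find_streak; infer_instance

-- ===== CLAIM (what is proved, stated in full; the proofs are below) =====
def Claim_equal_find_streak : Prop := ∀ (list : List Int) (aguja : Int) (n : Int), Dom_find_streak list aguja n → Spec_find_streak list aguja n (find_streak list aguja n)

-- ===== LEMMAS AND PROOFS =====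

-- reference scanner both ports are reduced to (for n ≥ 1)
def fsScan (aguja n : Int) : List Int → Int → Bool
  | [], _ => false
  | x :: rest, c =>
      if aguja = x then
        (if c + 1 ≥ n then true else fsScan aguja n rest (c + 1))
      else fsScan aguja n rest 0

-- once contador has reached n, A's loop stops immediately
theorem loopA_stop (aguja n : Int) (xs : List Int) (c : Int) (r : Bool) (h : ¬ c < n) :
    find_streak_loop aguja n xs c r = (c, r) := by
  cases xs <;> simp [find_streak_loop, h]

-- A's loop result equals the scanner (for 0 ≤ c < n, any racha flag)
theorem loopA_eq_scan (aguja n : Int) (xs : List Int) :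
    ∀ (c : Int) (r : Bool), 0 ≤ c → c < n →
      (decide ((find_streak_loop aguja n xs c r).1 ≥ n) && (find_streak_loop aguja n xs c r).2)
        = fsScan aguja n xs c := by
  induction xs with
  | nil =>
      intro c r h0 hc
      simp [find_streak_loop, fsScan]
      omega
  | cons x rest ih =>
      intro c r h0 hc
      simp only [find_streak_loop, if_pos hc]
      by_cases hx : aguja = x
      · rw [if_pos hx]
        simp only [fsScan, if_pos hx]
        by_cases hn : c + 1 ≥ n
        · rw [if_pos hn, loopA_stop aguja n rest (c + 1) true (by omega)]
          simp; omega
        · rw [if_neg hn]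
          exact ih (c + 1) true (by omega) (by omega)
      · rw [if_neg hx]
        simp only [fsScan, if_neg hx]
        exact ih 0 false (by omega) (by omega)

-- final run list of B's fold state
def fsFinish (st : List Int × Int) : List Int :=
  if st.2 ≠ 0 then st.1 ++ [st.2] else st.1

def fsAny (n : Int) (runs : List Int) : Bool := runs.any (fun r => decide (r ≥ n))

theorem fsAny_append (n : Int) (rs : List Int) (c : Int) :
    fsAny n (rs ++ [c]) = (fsAny n rs || decide (c ≥ n)) := by
  simp [fsAny]

-- L1: once a winning run is recorded, the final answer is true
theorem fold_won (n : Int) (bs : List Bool) :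
    ∀ (rs : List Int) (c : Int), fsAny n rs = true →
      fsAny n (fsFinish (bs.foldl fsCollect (rs, c))) = true := by
  induction bs with
  | nil =>
      intro rs c h
      by_cases hc : c ≠ 0 <;> simp [fsFinish, hc, fsAny_append, h]
  | cons b bs ih =>
      intro rs c h
      cases b with
      | true => simpa [List.foldl, fsCollect] using ih rs (c + 1) h
      | false =>
          by_cases hc : c ≠ 0
          · have h' : fsAny n (rs ++ [c]) = true := by
              simp [fsAny_append, h]
            simpa [List.foldl, fsCollect, hc] using ih (rs ++ [c]) 0 h'
          · simpa [List.foldl, fsCollect, hc] using ih rs 0 h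
  
-- L2: a current run that already reached n forces the final answer true
theorem fold_cur_won (n : Int) (hn : 1 ≤ n) (bs : List Bool) :
    ∀ (rs : List Int) (c : Int), c ≥ n →
      fsAny n (fsFinish (bs.foldl fsCollect (rs, c))) = true := by
  induction bs with
  | nil =>
      intro rs c hc
      have : c ≠ 0 := by omega
      simp [fsFinish, this, fsAny_append]
      right; omega
  | cons b bs ih =>
      intro rs c hc
      cases b with
      | true =>
          have := ih rs (c + 1) (by omega)
          simpa [List.foldl, fsCollect] using this
      | false =>
          have hc0 : c ≠ 0 := by omega
          have h' : fsAny n (rs ++ [c]) = true := by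
            simp [fsAny_append]; right; omega
          simpa [List.foldl, fsCollect, hc0] using fold_won n bs (rs ++ [c]) 0 h'

-- main B lemma: the fold over the mask equals the scanner (for 0 ≤ c < n)
theorem fold_eq_scan (aguja n : Int) (hn : 1 ≤ n) (xs : List Int) :
    ∀ (rs : List Int) (c : Int), 0 ≤ c → c < n → fsAny n rs = false →
      fsAny n (fsFinish ((xs.map (fun x => decide (x = aguja))).foldl fsCollect (rs, c)))
        = fsScan aguja n xs c := by
  induction xs with
  | nil =>
      intro rs c h0 hc hrs
      by_cases hcz : c ≠ 0
      · simp [fsFinish, hcz, fsAny_append, hrs, fsScan]; omega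
      · simp [fsFinish, hcz, hrs, fsScan]
  | cons x rest ih =>
      intro rs c h0 hc hrs
      simp only [List.map, List.foldl]
      by_cases hx : aguja = x
      · have hd : decide (x = aguja) = true := decide_eq_true hx.symm
        simp only [hd, fsCollect]
        simp only [fsScan, if_pos hx]
        by_cases hwin : c + 1 ≥ n
        · rw [if_pos hwin]
          exact fold_cur_won n hn _ rs (c + 1) hwin
        · rw [if_neg hwin]
          exact ih rs (c + 1) (by omega) (by omega) hrs
      · have hd : decide (x = aguja) = false := decide_eq_false (fun h => hx h.symm)
        simp only [hd]
        simp only [fsScan, if_neg hx]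
        by_cases hcz : c ≠ 0
        · have hrs' : fsAny n (rs ++ [c]) = false := by
            simp [fsAny_append, hrs]; omega
          simpa [fsCollect, hcz] using ih (rs ++ [c]) 0 (le_refl 0) (by omega) hrs'
        · simpa [fsCollect, hcz] using ih rs 0 (le_refl 0) (by omega) hrs

-- n = 0: A's loop never runs (contador < n fails immediately)
theorem loopA_n_nonpos (aguja n : Int) (hn : ¬ 0 < n) (xs : List Int) :
    find_streak_loop aguja n xs 0 false = (0, false) := by
  cases xs with
  | nil => rfl
  | cons x rest => simp [find_streak_loop, hn]

-- ===== VERDICT (by name: the statement is the Claim_ definition above) =====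
theorem find_streak_spec : Claim_equal_find_streak := by
  intro list aguja n _
  unfold Spec_find_streak find_streak find_streak_alt
  by_cases hn1 : n < 1
  · rw [if_pos hn1]
    by_cases hn0 : n ≥ 0
    · rw [if_pos hn0]
      have h := loopA_n_nonpos aguja n (by omega) list
      simp [h]
    · rw [if_neg hn0]
  · rw [if_neg hn1, if_pos (by omega)]
    have hA := loopA_eq_scan aguja n list 0 false (le_refl 0) (by omega)
    have hB := fold_eq_scan aguja n (by omega) list [] 0 (le_refl 0) (by omega) (by simp [fsAny])
    simp only [fsFinish, fsAny] at hB
    simp only [hA]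
    exact hB.symm
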